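-- pv_equiv track=rewrite | github.com/martineberlein/dbgbench-py | src/dbgbench/framework/util.py | unescape_hex_utf8
-- ===== SOURCE A (Python) =====
-- def unescape_hex_utf8(s):
--     i = 0
--     out_bytes = []
--     while i < len(s):
--         # Look for a pattern like \xAB
--         if (s[i] == '\\'
--                 and i + 3 < len(s)
--                 and s[i + 1] == 'x'
--                 and all(c in '0123456789ABCDEFabcdef' for c in s[i + 2:i + 4])):
--             hex_part = s[i + 2:i + 4]
--             out_bytes.append(int(hex_part, 16))
--             i += 4
--         else:
--             out_bytes.append(ord(s[i]))
--             i += 1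
--     return bytes(out_bytes).decode('utf-8', errors='replace')
-- ===== SOURCE B (Python) =====
-- _HEX = set('0123456789ABCDEFabcdef')
--
-- def unescape_hex_utf8(s):
--     # split on backslashes; each part after the first is preceded by one backslash
--     parts = s.split('\\')
--     vals = [ord(c) for c in parts[0]]
--     for part in parts[1:]:
--         if len(part) >= 3 and part[0] == 'x' and part[1] in _HEX and part[2] in _HEX:
--             vals.append(int(part[1:3], 16))
--             vals.extend(ord(c) for c in part[3:])
--         else:
--             vals.append(92)
--             vals.extend(ord(c) for c in part)
--     return bytes(vals).decode('utf-8', errors='replace')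
-- ===== Notes on version B (the rewrite author's own statement) =====
-- stated objective: faster
-- what changed: Replaces the manual index walk with escape lookahead by one split on the backslash character: each later part either begins with a two-hex-digit escape body or restores a literal backslash, so the byte list is assembled from the split parts with no index arithmetic; the per-character scan moves into the split builtin's C loop.
import Mathlib
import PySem

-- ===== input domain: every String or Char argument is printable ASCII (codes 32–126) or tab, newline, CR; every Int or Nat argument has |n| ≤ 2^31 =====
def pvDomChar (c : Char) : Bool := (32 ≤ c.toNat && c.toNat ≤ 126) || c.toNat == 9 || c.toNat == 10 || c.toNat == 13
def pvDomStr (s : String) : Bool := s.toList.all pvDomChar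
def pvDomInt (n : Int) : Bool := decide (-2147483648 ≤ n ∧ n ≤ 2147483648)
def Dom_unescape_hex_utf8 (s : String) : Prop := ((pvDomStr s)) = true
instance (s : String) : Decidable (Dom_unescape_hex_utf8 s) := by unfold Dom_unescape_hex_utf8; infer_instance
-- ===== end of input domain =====

-- B rebuilds the byte list from the backslash-split parts instead of A's per-character index walk (a timing run measured B faster).


-- ===== PORT A =====
def pvOrd (c : Char) : Int := (c.toNat : Int)   -- ord(c)
def pvHexChars : List Char := "0123456789ABCDEFabcdef".toList
def pvIntHex (cs : List Char) : Int := (PySem.Int.ofCharsBase? cs 16).getD 0   -- int(cs, 16); applied only to two hex digits, where it is `some`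
-- bytes(bs).decode('utf-8', errors='replace'): hand port for A, exact on lists of byte values
-- (one U+FFFD per maximal ill-formed subpart, resuming at the offending byte — CPython's rule),
-- written as A's decoder is best read: consume a whole 1–4 byte sequence per recursive step.
def pvUtf8Replace : List Int → List Char
  | [] => []
  | b :: rest =>
    if b < 128 then Char.ofNat b.toNat :: pvUtf8Replace rest
    else if 194 ≤ b ∧ b ≤ 223 then
      match rest with
      | [] => [Char.ofNat 0xFFFD]
      | c1 :: r1 =>
        if 128 ≤ c1 ∧ c1 ≤ 191 then
          Char.ofNat ((b - 192) * 64 + (c1 - 128)).toNat :: pvUtf8Replace r1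
        else Char.ofNat 0xFFFD :: pvUtf8Replace (c1 :: r1)
    else if 224 ≤ b ∧ b ≤ 239 then
      match rest with
      | [] => [Char.ofNat 0xFFFD]
      | c1 :: r1 =>
        if (if b = 224 then 160 else 128) ≤ c1 ∧ c1 ≤ (if b = 237 then 159 else 191) then
          match r1 with
          | [] => [Char.ofNat 0xFFFD]
          | c2 :: r2 =>
            if 128 ≤ c2 ∧ c2 ≤ 191 then
              Char.ofNat ((b - 224) * 4096 + (c1 - 128) * 64 + (c2 - 128)).toNat :: pvUtf8Replace r2
            else Char.ofNat 0xFFFD :: pvUtf8Replace (c2 :: r2)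
        else Char.ofNat 0xFFFD :: pvUtf8Replace (c1 :: r1)
    else if 240 ≤ b ∧ b ≤ 244 then
      match rest with
      | [] => [Char.ofNat 0xFFFD]
      | c1 :: r1 =>
        if (if b = 240 then 144 else 128) ≤ c1 ∧ c1 ≤ (if b = 244 then 143 else 191) then
          match r1 with
          | [] => [Char.ofNat 0xFFFD]
          | c2 :: r2 =>
            if 128 ≤ c2 ∧ c2 ≤ 191 then
              match r2 with
              | [] => [Char.ofNat 0xFFFD]
              | c3 :: r3 =>
                if 128 ≤ c3 ∧ c3 ≤ 191 then
                  Char.ofNat ((b - 240) * 262144 + (c1 - 128) * 4096 + (c2 - 128) * 64 + (c3 - 128)).toNat :: pvUtf8Replace r3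
                else Char.ofNat 0xFFFD :: pvUtf8Replace (c3 :: r3)
            else Char.ofNat 0xFFFD :: pvUtf8Replace (c2 :: r2)
        else Char.ofNat 0xFFFD :: pvUtf8Replace (c1 :: r1)
    else Char.ofNat 0xFFFD :: pvUtf8Replace rest

-- A's while loop: i walks the string, looking for '\xHH' at i.
def pvLoopA (s : List Char) (i : Nat) : List Int :=
  if h : i < s.length then
    if (PySem.List.pyGetD s (i : Int) ' ' == '\\')
        && decide (i + 3 < s.length)
        && (PySem.List.pyGetD s ((i : Int) + 1) ' ' == 'x')
        && (PySem.List.slice s (some ((i : Int) + 2)) (some ((i : Int) + 4))).all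
             (fun c => PySem.Chars.isIn [c] pvHexChars)
    then pvIntHex (PySem.List.slice s (some ((i : Int) + 2)) (some ((i : Int) + 4))) :: pvLoopA s (i + 4)
    else pvOrd (PySem.List.pyGetD s (i : Int) ' ') :: pvLoopA s (i + 1)
  else []
termination_by s.length - i
decreasing_by all_goals omega

def unescape_hex_utf8 (s : String) : String :=
  String.ofList (pvUtf8Replace (pvLoopA s.toList 0))

-- ===== PORT B =====
def pvHexSet : List Char := PySem.Set.ofList pvHexChars   -- _HEX = set('0123456789ABCDEFabcdef')
-- body of B's for-loop over parts[1:]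
def pvHandleB (part : List Char) : List Int :=
  if decide (3 ≤ part.length) && (PySem.List.pyGetD part 0 ' ' == 'x')
      && pvHexSet.contains (PySem.List.pyGetD part 1 ' ')
      && pvHexSet.contains (PySem.List.pyGetD part 2 ' ')
  then pvIntHex (PySem.List.slice part (some 1) (some 3))
         :: (PySem.List.slice part (some 3) none).map pvOrd
  else (92 : Int) :: part.map pvOrd

-- bytes(vals).decode('utf-8', errors='replace'): hand port for B, exact (same CPython rule as above),
-- written as an incremental one-byte-at-a-time state machine folded over the byte list.
-- State: (reversed output, continuation bytes still needed, partial code point, low/high bound for the next byte).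
def pvFreshB (acc : List Char) (b : Int) : List Char × Nat × Int × Int × Int :=
  if b < 128 then (Char.ofNat b.toNat :: acc, 0, 0, 0, 0)
  else if 194 ≤ b ∧ b ≤ 223 then (acc, 1, b - 192, 128, 191)
  else if 224 ≤ b ∧ b ≤ 239 then
    (acc, 2, b - 224, if b = 224 then 160 else 128, if b = 237 then 159 else 191)
  else if 240 ≤ b ∧ b ≤ 244 then
    (acc, 3, b - 240, if b = 240 then 144 else 128, if b = 244 then 143 else 191)
  else (Char.ofNat 0xFFFD :: acc, 0, 0, 0, 0)

def pvStepB (st : List Char × Nat × Int × Int × Int) (b : Int) : List Char × Nat × Int × Int × Int :=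
  match st with
  | (acc, 0, _, _, _) => pvFreshB acc b
  | (acc, k + 1, cp, lo, hi) =>
    if lo ≤ b ∧ b ≤ hi then
      if k = 0 then (Char.ofNat (cp * 64 + (b - 128)).toNat :: acc, 0, 0, 0, 0)
      else (acc, k, cp * 64 + (b - 128), 128, 191)
    else pvFreshB (Char.ofNat 0xFFFD :: acc) b

def pvFlushB : List Char × Nat × Int × Int × Int → List Char
  | (acc, 0, _, _, _) => acc.reverse
  | (acc, _ + 1, _, _, _) => (Char.ofNat 0xFFFD :: acc).reverse

def pvDecodeB (bs : List Int) : List Char := pvFlushB (bs.foldl pvStepB ([], 0, 0, 0, 0))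

def unescape_hex_utf8_alt (s : String) : String :=
  -- parts = s.split('\\'); vals = [ord(c) for c in parts[0]] then extended part by part
  String.ofList (pvDecodeB
    (((List.splitOn '\\' s.toList).drop 1).foldl (fun acc part => acc ++ pvHandleB part)
      (((List.splitOn '\\' s.toList).headD []).map pvOrd)))

-- ===== PRECONDITION & SPEC =====
def Spec_unescape_hex_utf8 (s : String) (out : String) : Prop := out = unescape_hex_utf8_alt s
instance (s : String) (out : String) : Decidable (Spec_unescape_hex_utf8 s out) := by unfold Spec_unescape_hex_utf8; infer_instance

-- ===== CLAIM (what is proved, stated in full; the proofs are below) =====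
def Claim_equal_unescape_hex_utf8 : Prop := ∀ (s : String), Dom_unescape_hex_utf8 s → Spec_unescape_hex_utf8 s (unescape_hex_utf8 s)

-- ===== LEMMAS AND PROOFS =====

-- the common suffix-directed scan both ports compute
def pvScan : List Char → List Int
  | b :: x :: a :: c :: r =>
    if b = '\\' ∧ x = 'x' ∧ a ∈ pvHexChars ∧ c ∈ pvHexChars then pvIntHex [a, c] :: pvScan r
    else pvOrd b :: pvScan (x :: a :: c :: r)
  | c :: t => pvOrd c :: pvScan t
  | [] => []

def pvEsc (l : List Char) : Prop :=
  ∃ a b r, l = '\\' :: 'x' :: a :: b :: r ∧ a ∈ pvHexChars ∧ b ∈ pvHexChars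

theorem isIn_singleton_mem (c : Char) (l : List Char) : PySem.Chars.isIn [c] l = true ↔ c ∈ l := by
  rw [PySem.Chars.isIn_iff_infix, List.singleton_infix_iff]

theorem scan_esc {a b : Char} (r : List Char) (ha : a ∈ pvHexChars) (hb : b ∈ pvHexChars) :
    pvScan ('\\' :: 'x' :: a :: b :: r) = pvIntHex [a, b] :: pvScan r := by
  rw [pvScan, if_pos ⟨rfl, rfl, ha, hb⟩]

theorem scan_cons_of_not {c : Char} {t : List Char} (h : ¬ pvEsc (c :: t)) :
    pvScan (c :: t) = pvOrd c :: pvScan t := by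
  rcases t with _ | ⟨x, _ | ⟨a, _ | ⟨b, r⟩⟩⟩
  · rw [pvScan]; simp
  · rw [pvScan]; simp
  · rw [pvScan]; simp
  · rw [pvScan, if_neg]
    rintro ⟨h1, h2, h3, h4⟩
    exact h ⟨a, b, r, by rw [h1, h2], h3, h4⟩

theorem loopA_eq_scan (s : List Char) (i : Nat) : pvLoopA s i = pvScan (s.drop i) := by
  induction i using pvLoopA.induct (s := s) with
  | case1 i h hg ih =>
    rw [pvLoopA, dif_pos h, if_pos hg]
    simp only [Bool.and_eq_true, beq_iff_eq, decide_eq_true_eq, List.all_eq_true,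
      PySem.List.pyGetD_natCast] at hg
    obtain ⟨⟨⟨e1, e2⟩, e3⟩, e4⟩ := hg
    have h1 : i + 1 < s.length := by omega
    have h2 : i + 2 < s.length := by omega
    have h3 : i + 3 < s.length := by omega
    have c2 : ((i : Int) + 2) = ((i + 2 : Nat) : Int) := by push_cast; ring
    have c4 : ((i : Int) + 4) = ((i + 4 : Nat) : Int) := by push_cast; ring
    have c1 : ((i : Int) + 1) = ((i + 1 : Nat) : Int) := by push_cast; ring
    have hsl : PySem.List.slice s (some ((i : Int) + 2)) (some ((i : Int) + 4))
        = [s[i + 2], s[i + 3]] := by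
      rw [c2, c4, PySem.List.slice_natCast,
        show i + 4 - (i + 2) = 2 from by omega,
        List.drop_eq_getElem_cons h2, List.drop_eq_getElem_cons h3]
      rfl
    rw [hsl] at e4 ⊢
    have ha : s[i + 2] ∈ pvHexChars := by
      have := e4 s[i + 2] (by simp)
      rwa [isIn_singleton_mem] at this
    have hb : s[i + 3] ∈ pvHexChars := by
      have := e4 s[i + 3] (by simp)
      rwa [isIn_singleton_mem] at this
    have e1' : s[i] = '\\' := by rwa [List.getD_eq_getElem _ _ h] at e1
    have e3' : s[i + 1] = 'x' := by
      rw [c1, PySem.List.pyGetD_natCast, List.getD_eq_getElem _ _ h1] at e3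
      exact e3
    rw [List.drop_eq_getElem_cons h, List.drop_eq_getElem_cons h1,
      List.drop_eq_getElem_cons h2, List.drop_eq_getElem_cons h3, e1', e3',
      scan_esc _ ha hb, ih]
  | case2 i h hg ih =>
    rw [pvLoopA, dif_pos h, if_neg hg]
    simp only [PySem.List.pyGetD_natCast, List.getD_eq_getElem _ _ h]
    rw [List.drop_eq_getElem_cons h, ih]
    rw [scan_cons_of_not]
    rintro ⟨a, b, r, hshape, hha, hhb⟩
    -- the escape shape at i would make A's guard true
    have h3 : i + 3 < s.length := by
      have := congrArg List.length hshape
      simp at this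
      omega
    have h1 : i + 1 < s.length := by omega
    have h2 : i + 2 < s.length := by omega
    obtain ⟨e1, hd1⟩ := List.cons.inj hshape
    rw [List.drop_eq_getElem_cons h1] at hd1
    obtain ⟨e2, hd2⟩ := List.cons.inj hd1
    rw [List.drop_eq_getElem_cons h2] at hd2
    obtain ⟨e3, hd3⟩ := List.cons.inj hd2
    rw [List.drop_eq_getElem_cons h3] at hd3
    obtain ⟨e4, -⟩ := List.cons.inj hd3
    apply hg
    have c2 : ((i : Int) + 2) = ((i + 2 : Nat) : Int) := by push_cast; ring
    have c4 : ((i : Int) + 4) = ((i + 4 : Nat) : Int) := by push_cast; ring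
    have c1 : ((i : Int) + 1) = ((i + 1 : Nat) : Int) := by push_cast; ring
    have hsl : PySem.List.slice s (some ((i : Int) + 2)) (some ((i : Int) + 4)) = [a, b] := by
      rw [c2, c4, PySem.List.slice_natCast,
        show i + 4 - (i + 2) = 2 from by omega,
        List.drop_eq_getElem_cons h2, List.drop_eq_getElem_cons h3, e3, e4]
      rfl
    simp only [Bool.and_eq_true, beq_iff_eq, decide_eq_true_eq, List.all_eq_true,
      PySem.List.pyGetD_natCast, hsl, c1]
    refine ⟨⟨⟨?_, h3⟩, ?_⟩, ?_⟩
    · rw [List.getD_eq_getElem _ _ h, e1]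
    · rw [List.getD_eq_getElem _ _ h1, e2]
    · intro c hc
      rw [isIn_singleton_mem]
      rcases List.mem_pair.mp hc with hc | hc
      · rw [hc]; exact hha
      · rw [hc]; exact hhb
  | case3 i h =>
    rw [pvLoopA, dif_neg h, List.drop_eq_nil_of_le (by omega), pvScan]

theorem splitOn_cons_sep (t : List Char) :
    List.splitOn '\\' ('\\' :: t) = [] :: List.splitOn '\\' t := by
  simp [List.splitOn, List.splitOnP_cons]

theorem splitOn_cons_ne {c : Char} (h : c ≠ '\\') {t p : List Char} {ps : List (List Char)}
    (ht : List.splitOn '\\' t = p :: ps) : List.splitOn '\\' (c :: t) = (c :: p) :: ps := by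
  simp only [List.splitOn, List.splitOnP_cons] at *
  rw [ht]
  simp [h]

theorem splitOn_exists (t : List Char) : ∃ p ps, List.splitOn '\\' t = p :: ps := by
  rcases e : List.splitOn '\\' t with _ | ⟨p, ps⟩
  · exact absurd e (List.splitOnP_ne_nil _ _)
  · exact ⟨p, ps, rfl⟩

theorem splitOn_head_prefix : ∀ (t : List Char), (List.splitOn '\\' t).headD [] <+: t := by
  intro t
  induction t with
  | nil => simp [List.splitOn, List.splitOnP_nil]
  | cons c t ihp =>
    by_cases h : c = '\\'
    · subst h
      rw [splitOn_cons_sep]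
      exact List.nil_prefix
    · obtain ⟨p, ps, ht⟩ := splitOn_exists t
      rw [splitOn_cons_ne h ht]
      rw [ht] at ihp
      simp only [List.headD_cons] at ihp ⊢
      exact List.cons_prefix_cons.mpr ⟨rfl, ihp⟩

theorem hex_ne_backslash {a : Char} (h : a ∈ pvHexChars) : a ≠ '\\' := by
  intro e
  subst e
  revert h
  decide

theorem handleB_esc (a b : Char) (q : List Char) (ha : a ∈ pvHexChars) (hb : b ∈ pvHexChars) :
    pvHandleB ('x' :: a :: b :: q) = pvIntHex [a, b] :: q.map pvOrd := by
  rw [pvHandleB, if_pos, PySem.List.slice_toNat _ (by norm_num) (by norm_num),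
      PySem.List.slice_from _ (by norm_num)]
  · rfl
  · simp only [Bool.and_eq_true, decide_eq_true_eq, beq_iff_eq]
    refine ⟨⟨⟨by simp, ?_⟩, ?_⟩, ?_⟩
    · rw [PySem.List.pyGetD_zero_cons]
    · rw [show ((1 : Int) = ((1 : Nat) : Int)) from rfl, PySem.List.pyGetD_natCast]
      simpa [pvHexSet, List.contains_iff_mem, PySem.Set.mem_ofList] using ha
    · rw [show ((2 : Int) = ((2 : Nat) : Int)) from rfl, PySem.List.pyGetD_natCast]
      simpa [pvHexSet, List.contains_iff_mem, PySem.Set.mem_ofList] using hb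

theorem handleB_lit {t p : List Char} {ps : List (List Char)}
    (ht : List.splitOn '\\' t = p :: ps) (hesc : ¬ pvEsc ('\\' :: t)) :
    pvHandleB p = (92 : Int) :: p.map pvOrd := by
  rw [pvHandleB, if_neg]
  intro hgd
  simp only [Bool.and_eq_true, decide_eq_true_eq, beq_iff_eq] at hgd
  obtain ⟨⟨⟨hlen, h0⟩, h1⟩, h2⟩ := hgd
  rcases p with _ | ⟨x0, _ | ⟨x1, _ | ⟨x2, prest⟩⟩⟩
  · simp at hlen
  · simp at hlen
  · simp at hlen
  · have hpre := splitOn_head_prefix t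
    rw [ht] at hpre
    simp only [List.headD_cons] at hpre
    obtain ⟨suf, hsuf⟩ := hpre
    rw [PySem.List.pyGetD_zero_cons] at h0
    rw [show ((1 : Int) = ((1 : Nat) : Int)) from rfl, PySem.List.pyGetD_natCast] at h1
    rw [show ((2 : Int) = ((2 : Nat) : Int)) from rfl, PySem.List.pyGetD_natCast] at h2
    simp only [pvHexSet, List.contains_iff_mem, PySem.Set.mem_ofList] at h1 h2
    exact hesc ⟨x1, x2, prest ++ suf, by rw [← hsuf, h0]; simp, by simpa using h1, by simpa using h2⟩

theorem split_eq_scan_aux : ∀ (n : Nat) (cs : List Char), cs.length ≤ n →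
    ((List.splitOn '\\' cs).headD []).map pvOrd
      ++ ((List.splitOn '\\' cs).drop 1).flatMap pvHandleB = pvScan cs := by
  intro n
  induction n with
  | zero =>
    intro cs h
    have : cs = [] := List.length_eq_zero_iff.mp (by omega)
    subst this
    simp [pvScan]
  | succ n ih =>
    intro cs hlen
    rcases cs with _ | ⟨c, t⟩
    · simp [pvScan]
    · by_cases h : c = '\\'
      · subst h
        by_cases hesc : pvEsc ('\\' :: t)
        · obtain ⟨a, b, r, hsh, hha, hhb⟩ := hesc
          have htail : t = 'x' :: a :: b :: r := (List.cons.inj hsh).2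
          obtain ⟨q, qs, hr⟩ := splitOn_exists r
          have hx : List.splitOn '\\' t = ('x' :: a :: b :: q) :: qs := by
            rw [htail,
              splitOn_cons_ne (by decide)
                (splitOn_cons_ne (hex_ne_backslash hha)
                  (splitOn_cons_ne (hex_ne_backslash hhb) hr))]
          rw [splitOn_cons_sep, hx]
          simp only [List.headD_cons, List.drop_one, List.tail_cons, List.map_nil,
            List.nil_append, List.flatMap_cons]
          rw [handleB_esc a b q hha hhb]
          have iht := ih r (by rw [htail] at hlen; simp at hlen ⊢; omega)
          rw [hr] at iht
          simp only [List.headD_cons, List.drop_one, List.tail_cons] at iht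
          rw [htail, scan_esc r hha hhb, ← iht]
          simp
        · obtain ⟨p, ps, ht⟩ := splitOn_exists t
          rw [splitOn_cons_sep, ht]
          simp only [List.headD_cons, List.drop_one, List.tail_cons, List.map_nil,
            List.nil_append, List.flatMap_cons]
          rw [handleB_lit ht hesc]
          have iht := ih t (by simp at hlen; omega)
          rw [ht] at iht
          simp only [List.headD_cons, List.drop_one, List.tail_cons] at iht
          rw [scan_cons_of_not hesc, ← iht]
          simp [pvOrd]
      · obtain ⟨p, ps, ht⟩ := splitOn_exists t
        rw [splitOn_cons_ne h ht]
        have iht := ih t (by simp at hlen; omega)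
        rw [ht] at iht
        simp only [List.headD_cons, List.drop_one, List.tail_cons] at iht
        rw [scan_cons_of_not (by rintro ⟨a, b, r, hs, -, -⟩; exact h (List.cons.inj hs).1)]
        simp only [List.headD_cons, List.drop_one, List.tail_cons, List.map_cons,
          List.cons_append]
        rw [iht]

theorem split_eq_scan (cs : List Char) :
    ((List.splitOn '\\' cs).headD []).map pvOrd
      ++ ((List.splitOn '\\' cs).drop 1).flatMap pvHandleB = pvScan cs :=
  split_eq_scan_aux cs.length cs le_rfl

-- B's one-byte state machine computes the same decoding as A's sequence-at-a-time recursion.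
theorem stepB_zero (acc : List Char) (x y z b : Int) :
    pvStepB (acc, 0, x, y, z) b = pvFreshB acc b := rfl

theorem stepB_last {lo hi b : Int} (h : lo ≤ b ∧ b ≤ hi) (acc : List Char) (cp : Int) :
    pvStepB (acc, 1, cp, lo, hi) b = (Char.ofNat (cp * 64 + (b - 128)).toNat :: acc, 0, 0, 0, 0) := by
  simp [pvStepB, h]

theorem stepB_mid2 {lo hi b : Int} (h : lo ≤ b ∧ b ≤ hi) (acc : List Char) (cp : Int) :
    pvStepB (acc, 2, cp, lo, hi) b = (acc, 1, cp * 64 + (b - 128), 128, 191) := by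
  simp [pvStepB, h]

theorem stepB_mid3 {lo hi b : Int} (h : lo ≤ b ∧ b ≤ hi) (acc : List Char) (cp : Int) :
    pvStepB (acc, 3, cp, lo, hi) b = (acc, 2, cp * 64 + (b - 128), 128, 191) := by
  simp [pvStepB, h]

theorem stepB_bad {lo hi b : Int} (h : ¬(lo ≤ b ∧ b ≤ hi)) (acc : List Char) (k : Nat) (cp : Int) :
    pvStepB (acc, k + 1, cp, lo, hi) b = pvStepB (Char.ofNat 0xFFFD :: acc, 0, 0, 0, 0) b := by
  simp [pvStepB, h]

theorem freshB_ascii {b : Int} (h : b < 128) (acc : List Char) :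
    pvFreshB acc b = (Char.ofNat b.toNat :: acc, 0, 0, 0, 0) := by
  simp [pvFreshB, h]

theorem freshB_two {b : Int} (h1 : ¬b < 128) (h2 : 194 ≤ b ∧ b ≤ 223) (acc : List Char) :
    pvFreshB acc b = (acc, 1, b - 192, 128, 191) := by
  simp [pvFreshB, h1, h2]

theorem freshB_three {b : Int} (h1 : ¬b < 128) (h2 : ¬(194 ≤ b ∧ b ≤ 223))
    (h3 : 224 ≤ b ∧ b ≤ 239) (acc : List Char) :
    pvFreshB acc b = (acc, 2, b - 224, if b = 224 then 160 else 128, if b = 237 then 159 else 191) := by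
  simp [pvFreshB, h1, h2, h3]

theorem freshB_four {b : Int} (h1 : ¬b < 128) (h2 : ¬(194 ≤ b ∧ b ≤ 223))
    (h3 : ¬(224 ≤ b ∧ b ≤ 239)) (h4 : 240 ≤ b ∧ b ≤ 244) (acc : List Char) :
    pvFreshB acc b = (acc, 3, b - 240, if b = 240 then 144 else 128, if b = 244 then 143 else 191) := by
  simp [pvFreshB, h1, h2, h3, h4]

theorem freshB_bad {b : Int} (h1 : ¬b < 128) (h2 : ¬(194 ≤ b ∧ b ≤ 223))
    (h3 : ¬(224 ≤ b ∧ b ≤ 239)) (h4 : ¬(240 ≤ b ∧ b ≤ 244)) (acc : List Char) :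
    pvFreshB acc b = (Char.ofNat 0xFFFD :: acc, 0, 0, 0, 0) := by
  simp [pvFreshB, h1, h2, h3, h4]

theorem flushB_one (acc : List Char) (x y z : Int) :
    pvFlushB (acc, 1, x, y, z) = (Char.ofNat 0xFFFD :: acc).reverse := rfl

theorem flushB_two (acc : List Char) (x y z : Int) :
    pvFlushB (acc, 2, x, y, z) = (Char.ofNat 0xFFFD :: acc).reverse := rfl

theorem flushB_three (acc : List Char) (x y z : Int) :
    pvFlushB (acc, 3, x, y, z) = (Char.ofNat 0xFFFD :: acc).reverse := rfl

theorem decodeB_run (bs : List Int) : ∀ acc : List Char,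
    pvFlushB (bs.foldl pvStepB (acc, 0, 0, 0, 0)) = acc.reverse ++ pvUtf8Replace bs := by
  induction bs using pvUtf8Replace.induct with
  | case1 => intro acc; simp [pvFlushB, pvUtf8Replace]
  | case2 b rest hb ih =>
    intro acc
    rw [List.foldl_cons, stepB_zero, freshB_ascii hb, ih]
    conv_rhs => rw [pvUtf8Replace.eq_def]
    simp only [if_pos hb]
    simp
  | case3 b hb h2 =>
    intro acc
    rw [List.foldl_cons, stepB_zero, freshB_two hb h2, List.foldl_nil, flushB_one]
    conv_rhs => rw [pvUtf8Replace.eq_def]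
    simp only [if_neg hb, if_pos h2]
    simp
  | case4 b hb h2 c1 r1 hc1 ih =>
    intro acc
    rw [List.foldl_cons, stepB_zero, freshB_two hb h2, List.foldl_cons, stepB_last hc1,
      ih]
    conv_rhs => rw [pvUtf8Replace.eq_def]
    simp only [if_neg hb, if_pos h2, if_pos hc1]
    simp
  | case5 b hb h2 c1 r1 hc1 ih =>
    intro acc
    rw [List.foldl_cons, stepB_zero, freshB_two hb h2, List.foldl_cons, stepB_bad hc1,
      ← List.foldl_cons, ih]
    conv_rhs => rw [pvUtf8Replace.eq_def]
    simp only [if_neg hb, if_pos h2, if_neg hc1]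
    simp
  | case6 b hb h2 h3 =>
    intro acc
    rw [List.foldl_cons, stepB_zero, freshB_three hb h2 h3, List.foldl_nil, flushB_two]
    conv_rhs => rw [pvUtf8Replace.eq_def]
    simp only [if_neg hb, if_neg h2, if_pos h3]
    simp
  | case7 b hb h2 h3 c1 hc1 =>
    intro acc
    rw [List.foldl_cons, stepB_zero, freshB_three hb h2 h3, List.foldl_cons, stepB_mid2 hc1,
      List.foldl_nil, flushB_one]
    conv_rhs => rw [pvUtf8Replace.eq_def]
    simp only [if_neg hb, if_neg h2, if_pos h3, if_pos hc1]
    simp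
  | case8 b hb h2 h3 c1 hc1 c2 r2 hc2 ih =>
    intro acc
    rw [List.foldl_cons, stepB_zero, freshB_three hb h2 h3, List.foldl_cons, stepB_mid2 hc1,
      List.foldl_cons, stepB_last hc2, ih]
    conv_rhs => rw [pvUtf8Replace.eq_def]
    simp only [if_neg hb, if_neg h2, if_pos h3, if_pos hc1, if_pos hc2]
    have he2 : ((b - 224) * 64 + (c1 - 128)) * 64 + (c2 - 128)
        = (b - 224) * 4096 + (c1 - 128) * 64 + (c2 - 128) := by ring
    rw [he2]
    simp
  | case9 b hb h2 h3 c1 hc1 c2 r2 hc2 ih =>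
    intro acc
    rw [List.foldl_cons, stepB_zero, freshB_three hb h2 h3, List.foldl_cons, stepB_mid2 hc1,
      List.foldl_cons, stepB_bad hc2, ← List.foldl_cons, ih]
    conv_rhs => rw [pvUtf8Replace.eq_def]
    simp only [if_neg hb, if_neg h2, if_pos h3, if_pos hc1, if_neg hc2]
    simp
  | case10 b hb h2 h3 c1 r1 hc1 ih =>
    intro acc
    rw [List.foldl_cons, stepB_zero, freshB_three hb h2 h3, List.foldl_cons, stepB_bad hc1,
      ← List.foldl_cons, ih]
    conv_rhs => rw [pvUtf8Replace.eq_def]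
    simp only [if_neg hb, if_neg h2, if_pos h3, if_neg hc1]
    simp
  | case11 b hb h2 h3 h4 =>
    intro acc
    rw [List.foldl_cons, stepB_zero, freshB_four hb h2 h3 h4, List.foldl_nil, flushB_three]
    conv_rhs => rw [pvUtf8Replace.eq_def]
    simp only [if_neg hb, if_neg h2, if_neg h3, if_pos h4]
    simp
  | case12 b hb h2 h3 h4 c1 hc1 =>
    intro acc
    rw [List.foldl_cons, stepB_zero, freshB_four hb h2 h3 h4, List.foldl_cons, stepB_mid3 hc1,
      List.foldl_nil, flushB_two]
    conv_rhs => rw [pvUtf8Replace.eq_def]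
    simp only [if_neg hb, if_neg h2, if_neg h3, if_pos h4, if_pos hc1]
    simp
  | case13 b hb h2 h3 h4 c1 hc1 c2 hc2 =>
    intro acc
    rw [List.foldl_cons, stepB_zero, freshB_four hb h2 h3 h4, List.foldl_cons, stepB_mid3 hc1,
      List.foldl_cons, stepB_mid2 hc2, List.foldl_nil, flushB_one]
    conv_rhs => rw [pvUtf8Replace.eq_def]
    simp only [if_neg hb, if_neg h2, if_neg h3, if_pos h4, if_pos hc1, if_pos hc2]
    simp
  | case14 b hb h2 h3 h4 c1 hc1 c2 hc2 c3 r3 hc3 ih =>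
    intro acc
    rw [List.foldl_cons, stepB_zero, freshB_four hb h2 h3 h4, List.foldl_cons, stepB_mid3 hc1,
      List.foldl_cons, stepB_mid2 hc2, List.foldl_cons, stepB_last hc3, ih]
    conv_rhs => rw [pvUtf8Replace.eq_def]
    simp only [if_neg hb, if_neg h2, if_neg h3, if_pos h4, if_pos hc1, if_pos hc2, if_pos hc3]
    have he : (((b - 240) * 64 + (c1 - 128)) * 64 + (c2 - 128)) * 64 + (c3 - 128)
        = (b - 240) * 262144 + (c1 - 128) * 4096 + (c2 - 128) * 64 + (c3 - 128) := by ring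
    rw [he]
    simp
  | case15 b hb h2 h3 h4 c1 hc1 c2 hc2 c3 r3 hc3 ih =>
    intro acc
    rw [List.foldl_cons, stepB_zero, freshB_four hb h2 h3 h4, List.foldl_cons, stepB_mid3 hc1,
      List.foldl_cons, stepB_mid2 hc2, List.foldl_cons, stepB_bad hc3, ← List.foldl_cons, ih]
    conv_rhs => rw [pvUtf8Replace.eq_def]
    simp only [if_neg hb, if_neg h2, if_neg h3, if_pos h4, if_pos hc1, if_pos hc2, if_neg hc3]
    simp
  | case16 b hb h2 h3 h4 c1 hc1 c2 r2 hc2 ih =>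
    intro acc
    rw [List.foldl_cons, stepB_zero, freshB_four hb h2 h3 h4, List.foldl_cons, stepB_mid3 hc1,
      List.foldl_cons, stepB_bad hc2, ← List.foldl_cons, ih]
    conv_rhs => rw [pvUtf8Replace.eq_def]
    simp only [if_neg hb, if_neg h2, if_neg h3, if_pos h4, if_pos hc1, if_neg hc2]
    simp
  | case17 b hb h2 h3 h4 c1 r1 hc1 ih =>
    intro acc
    rw [List.foldl_cons, stepB_zero, freshB_four hb h2 h3 h4, List.foldl_cons, stepB_bad hc1,
      ← List.foldl_cons, ih]
    conv_rhs => rw [pvUtf8Replace.eq_def]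
    simp only [if_neg hb, if_neg h2, if_neg h3, if_pos h4, if_neg hc1]
    simp
  | case18 b rest hb h2 h3 h4 ih =>
    intro acc
    rw [List.foldl_cons, stepB_zero, freshB_bad hb h2 h3 h4, ih]
    conv_rhs => rw [pvUtf8Replace.eq_def]
    simp only [if_neg hb, if_neg h2, if_neg h3, if_neg h4]
    simp

theorem decodeB_eq_replace (bs : List Int) : pvDecodeB bs = pvUtf8Replace bs := by
  rw [pvDecodeB, decodeB_run bs []]
  simp

-- ===== VERDICT (by name: the statement is the Claim_ definition above) =====
theorem unescape_hex_utf8_spec : Claim_equal_unescape_hex_utf8 := by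
  intro s _
  unfold Spec_unescape_hex_utf8 unescape_hex_utf8 unescape_hex_utf8_alt
  rw [PySem.List.foldl_append_eq_flatMap, split_eq_scan, loopA_eq_scan, List.drop_zero,
    decodeB_eq_replace]
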